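-- pv_equiv track=rewrite | github.com/LeongWZ/SudokuSolver | sudoku_solver.py | inRow
-- ===== SOURCE A (Python) =====
-- def inRow(i, j, board):
--     if board[i][j] == '.':
--         return False
--
--     # searching left
--     ref_j = j-1
--     while ref_j >= 0:
--         if board[i][ref_j] == board[i][j]:
--             return True
--         ref_j -= 1
--
--     # searching right
--     ref_j = j+1
--     while ref_j <= 8:
--         if board[i][ref_j] == board[i][j]:
--             return True
--         ref_j += 1
--
--     return False
-- ===== SOURCE B (Python) =====
-- def inRow(i, j, board):
--     row = board[i]
--     cell = row[j]
--     if cell == '.':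
--         return False
--     first = row.index(cell)
--     last = len(row) - 1 - row[::-1].index(cell)
--     return first != last
-- ===== Notes on version B (the rewrite author's own statement) =====
-- stated objective: alternative
-- what changed: Instead of scanning left and right of j for a second equal cell, B computes the positions of the first and last occurrence of the cell's value (row.index on the row and on its reversal) and reports a duplicate iff they differ.
-- intended difference: On in-range negative j over a row of at most 9 cells whose cell value is not '.' and occurs only once, A returns True because Python negative-index wraparound makes its right-hand scan revisit the cell itself, while B returns False, the intended answer (the value is not duplicated in its row). — e.g. on inRow(0, -1, [["1", "2"]]): A returns true, B returns false
-- outside the precondition, e.g. on inRow(0, 0, [['1', '2', '3', '4', '5', '6', '7', '8', '9', '1']]): A returns False, B returns True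
import Mathlib
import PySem

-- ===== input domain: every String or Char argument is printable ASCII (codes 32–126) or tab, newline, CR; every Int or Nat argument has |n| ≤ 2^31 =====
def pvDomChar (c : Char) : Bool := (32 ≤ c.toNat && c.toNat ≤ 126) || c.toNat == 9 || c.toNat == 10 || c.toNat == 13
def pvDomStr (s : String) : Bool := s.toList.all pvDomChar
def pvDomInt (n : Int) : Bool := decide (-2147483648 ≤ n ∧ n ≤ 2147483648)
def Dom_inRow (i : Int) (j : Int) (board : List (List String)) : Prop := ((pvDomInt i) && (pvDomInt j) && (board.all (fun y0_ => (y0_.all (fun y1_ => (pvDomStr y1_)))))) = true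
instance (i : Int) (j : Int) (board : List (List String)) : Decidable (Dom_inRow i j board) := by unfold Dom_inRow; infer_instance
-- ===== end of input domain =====

-- B replaces A's two directional while-loops with a first-occurrence vs last-occurrence comparison (row.index on the row and on its reversal): an alternative positional characterization, same cost; on in-range negative j (short rows) A's wraparound self-hit is corrected (see D_inRow).


-- ===== PORT A =====
-- left while-loop: 'ref_j = j-1; while ref_j >= 0: if board[i][ref_j] == board[i][j]: return True; ref_j -= 1'
-- (board[i] is a pure lookup, hoisted to 'row'; the fuel only bounds the loop — j.toNat iterations reach ref_j = 0 exactly)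
def inRowLeft (row : List String) (cell : String) : Int → Nat → Bool
  | _, 0 => false
  | ref_j, fuel+1 =>
    if ref_j ≥ 0 then
      if PySem.List.pyGetD row ref_j "" == cell then true
      else inRowLeft row cell (ref_j - 1) fuel
    else false

-- right while-loop: 'ref_j = j+1; while ref_j <= 8: if board[i][ref_j] == board[i][j]: return True; ref_j += 1'
def inRowRight (row : List String) (cell : String) : Int → Nat → Bool
  | _, 0 => false
  | ref_j, fuel+1 =>
    if ref_j ≤ 8 then
      if PySem.List.pyGetD row ref_j "" == cell then true
      else inRowRight row cell (ref_j + 1) fuel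
    else false

def inRow (i : Int) (j : Int) (board : List (List String)) : Bool :=
  let row := PySem.List.pyGetD board i []
  let cell := PySem.List.pyGetD row j ""
  if cell == "." then false
  else if inRowLeft row cell (j - 1) j.toNat then true
  else inRowRight row cell (j + 1) (9 - j).toNat

-- ===== PORT B =====
-- first = row.index(cell); last = len(row) - 1 - row[::-1].index(cell); return first != last
def inRow_alt (i : Int) (j : Int) (board : List (List String)) : Bool :=
  let row := PySem.List.pyGetD board i []
  let cell := PySem.List.pyGetD row j ""
  if cell == "." then false
  else
    let first : Int := (((PySem.List.index? row cell).getD 0 : Nat) : Int)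
    let last : Int := (row.length : Int) - 1 - (((PySem.List.index? row.reverse cell).getD 0 : Nat) : Int)
    decide (first ≠ last)

-- ===== PRECONDITION & SPEC =====
-- Pre_ admits the inputs where A returns a value of the row-duplicate check: in-range (possibly
-- negative, Python-style) indices and either (for j ≥ 0) (a) the cell is '.', or (b) a row of at
-- most 9 cells holding a duplicate of the cell (the scans' outcome is forced before A can run off
-- the row's end), or (c) a row of at least the 9 cells the hard-coded right bound 8 assumes, with
-- j < 9 and any duplicate of the cell visible inside the scanned first 9 cells (or no duplicate
-- hiding beyond them), or (d) j ≥ 9 (the right scan never runs) with any duplicate lying left of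
-- j (or none at all); or (for j < 0) a row of at most 9 cells (the wrapped right scan always
-- terminates, see D_inRow).  Outside Pre_ A raises IndexError (duplicate-free short rows,
-- out-of-range indices) or returns an artefact of the hard-coded bound 8 on rows longer than 9
-- (a duplicate sitting only beyond the partially scanned region), meaningless for a Sudoku row.
def Pre_inRow (i : Int) (j : Int) (board : List (List String)) : Prop :=
  -(board.length : Int) ≤ i ∧ i < (board.length : Int) ∧
  -(((PySem.List.pyGetD board i []).length : Int)) ≤ j ∧
  j < ((PySem.List.pyGetD board i []).length : Int) ∧
  ((0 ≤ j ∧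
    (PySem.List.pyGetD (PySem.List.pyGetD board i []) j "" = "." ∨
     ((PySem.List.pyGetD board i []).length ≤ 9 ∧
       (PySem.List.pyGetD (PySem.List.pyGetD board i []) j "" ∈ (PySem.List.pyGetD board i []).take j.toNat ∨
        PySem.List.pyGetD (PySem.List.pyGetD board i []) j "" ∈ (PySem.List.pyGetD board i []).drop (j.toNat + 1))) ∨
     (9 ≤ (PySem.List.pyGetD board i []).length ∧ j < 9 ∧
       (PySem.List.pyGetD (PySem.List.pyGetD board i []) j "" ∈ (PySem.List.pyGetD board i []).take j.toNat ∨
        PySem.List.pyGetD (PySem.List.pyGetD board i []) j "" ∈ ((PySem.List.pyGetD board i []).take 9).drop (j.toNat + 1) ∨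
        PySem.List.pyGetD (PySem.List.pyGetD board i []) j "" ∉ (PySem.List.pyGetD board i []).drop 9)) ∨
     (9 ≤ j ∧
       (PySem.List.pyGetD (PySem.List.pyGetD board i []) j "" ∈ (PySem.List.pyGetD board i []).take j.toNat ∨
        PySem.List.pyGetD (PySem.List.pyGetD board i []) j "" ∉ (PySem.List.pyGetD board i []).drop (j.toNat + 1))))) ∨
   (j < 0 ∧ (PySem.List.pyGetD board i []).length ≤ 9))
instance (i : Int) (j : Int) (board : List (List String)) : Decidable (Pre_inRow i j board) := by unfold Pre_inRow; infer_instance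

def pvWitness_inRow : Int × Int × List (List String) :=
  (0, 4, [["5", "3", ".", ".", "7", ".", ".", ".", "5"]])

-- On in-range negative j over a row of at most 9 cells whose cell value is not '.' and occurs only
-- once, A returns True because Python negative-index wraparound makes its right-hand scan revisit
-- the cell itself, while B returns False, the intended answer (the value is not duplicated).
def D_inRow (i : Int) (j : Int) (board : List (List String)) : Prop :=
  let row := PySem.List.pyGetD board i [];
  let cell := PySem.List.pyGetD row j "";
  -(row.length : Int) ≤ j ∧ j < 0 ∧ ¬ cell = "." ∧ row.count cell = 1
instance (i : Int) (j : Int) (board : List (List String)) : Decidable (D_inRow i j board) := by unfold D_inRow; infer_instance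

def Spec_inRow (i : Int) (j : Int) (board : List (List String)) (out : Bool) : Prop := ¬ D_inRow i j board → out = inRow_alt i j board
instance (i : Int) (j : Int) (board : List (List String)) (out : Bool) : Decidable (Spec_inRow i j board out) := by unfold Spec_inRow; infer_instance

def pvDiffWitness_inRow : Int × Int × List (List String) := (0, -1, [["1", "2"]])
def pvDiffWitnessOut_inRow : Bool × Bool := (true, false)

-- ===== CLAIM (what is proved, stated in full; the proofs are below) =====
def Claim_unchanged_inRow : Prop := ∀ (i : Int) (j : Int) (board : List (List String)), Dom_inRow i j board → Pre_inRow i j board → Spec_inRow i j board (inRow i j board)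
def Claim_changed_inRow : Prop := Dom_inRow (pvDiffWitness_inRow.1) (pvDiffWitness_inRow.2.1) (pvDiffWitness_inRow.2.2) ∧ Pre_inRow (pvDiffWitness_inRow.1) (pvDiffWitness_inRow.2.1) (pvDiffWitness_inRow.2.2) ∧ D_inRow (pvDiffWitness_inRow.1) (pvDiffWitness_inRow.2.1) (pvDiffWitness_inRow.2.2) ∧ inRow (pvDiffWitness_inRow.1) (pvDiffWitness_inRow.2.1) (pvDiffWitness_inRow.2.2) = pvDiffWitnessOut_inRow.1 ∧ inRow_alt (pvDiffWitness_inRow.1) (pvDiffWitness_inRow.2.1) (pvDiffWitness_inRow.2.2) = pvDiffWitnessOut_inRow.2 ∧ pvDiffWitnessOut_inRow.1 ≠ pvDiffWitnessOut_inRow.2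
def Claim_exact_inRow : Prop := ∀ (i : Int) (j : Int) (board : List (List String)), Dom_inRow i j board → Pre_inRow i j board → D_inRow i j board → inRow i j board ≠ inRow_alt i j board

-- ===== LEMMAS AND PROOFS =====

-- D_inRow with its lets unfolded (definitional)
theorem D_inRow_iff (i : Int) (j : Int) (board : List (List String)) :
    D_inRow i j board ↔
      (-(((PySem.List.pyGetD board i []).length : Int)) ≤ j ∧ j < 0 ∧
       ¬ PySem.List.pyGetD (PySem.List.pyGetD board i []) j "" = "." ∧
       List.count (PySem.List.pyGetD (PySem.List.pyGetD board i []) j "") (PySem.List.pyGetD board i []) = 1) :=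
  Iff.rfl

-- B's test 'first occurrence index ≠ last occurrence index' holds iff the value occurs more than once
theorem firstLast_ne_iff (row : List String) (c : String) (hc : c ∈ row) :
    (decide ((((PySem.List.index? row c).getD 0 : Nat) : Int) ≠
      (row.length : Int) - 1 - (((PySem.List.index? row.reverse c).getD 0 : Nat) : Int)))
    = decide (1 < PySem.List.count row c) := by
  rw [decide_eq_decide]
  obtain ⟨f, hf⟩ := Option.isSome_iff_exists.mp ((PySem.List.index?_isSome_iff _ _).mpr hc)
  have hcr : c ∈ row.reverse := List.mem_reverse.mpr hc
  obtain ⟨r, hr⟩ := Option.isSome_iff_exists.mp ((PySem.List.index?_isSome_iff _ _).mpr hcr)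
  rw [hf, hr]
  simp only [Option.getD_some]
  obtain ⟨pre, suf, hrow, hpl, hnpre⟩ := (PySem.List.index?_eq_some_iff _ _ _).mp hf
  obtain ⟨pre', suf', hrev, hpl', hnpre'⟩ := (PySem.List.index?_eq_some_iff _ _ _).mp hr
  have hrow2 : row = suf'.reverse ++ c :: pre'.reverse := by
    have h := congrArg List.reverse hrev
    rw [List.reverse_reverse] at h
    rw [h, List.reverse_append, List.reverse_cons, List.append_assoc]
    simp
  have hlen : row.length = pre.length + 1 + suf.length := by
    rw [hrow]; simp; omega
  have hlen2 : row.length = suf'.length + 1 + pre'.length := by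
    rw [hrow2]; simp; omega
  have key : (pre.length ≠ suf'.reverse.length) ↔ 1 < PySem.List.count row c := by
    constructor
    · intro hne
      rcases Nat.lt_or_ge pre.length suf'.reverse.length with h | h
      · -- first occurrence strictly left of the last: c occurs in suf'.reverse too
        have hplt : pre.length < row.length := by omega
        have hgetrow : row[pre.length]'hplt = c := by
          simp only [hrow]
          rw [List.getElem_append_right (le_refl pre.length)]
          simp
        have hgetA : suf'.reverse[pre.length]'h = c := by
          rw [← hgetrow]
          simp only [hrow2]
          rw [List.getElem_append_left h]
        have hmem : c ∈ suf'.reverse := hgetA ▸ List.getElem_mem h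
        have hpos : 0 < (suf'.reverse).count c := List.count_pos_iff.mpr hmem
        rw [PySem.List.count_eq, hrow2, List.count_append, List.count_cons_self]
        omega
      · -- the last occurrence strictly left of the first is impossible (c would be in pre)
        have h' : suf'.reverse.length < pre.length := lt_of_le_of_ne h (Ne.symm hne)
        have hblt : suf'.reverse.length < row.length := by omega
        have hgetrow : row[suf'.reverse.length]'hblt = c := by
          simp only [hrow2]
          rw [List.getElem_append_right (le_refl suf'.reverse.length)]
          simp
        have hgetP : pre[suf'.reverse.length]'h' = c := by
          rw [← hgetrow]
          simp only [hrow]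
          rw [List.getElem_append_left h']
        exact absurd (hgetP ▸ List.getElem_mem h') hnpre
    · intro hgt heq
      -- equal positions: the decompositions coincide and the count is 1
      have hpair := List.append_inj (hrow.symm.trans hrow2) heq
      have hsuf : suf = pre'.reverse := by
        have := hpair.2
        exact List.cons_injective this
      have hnsuf : c ∉ suf := by
        rw [hsuf, List.mem_reverse]; exact hnpre'
      have : PySem.List.count row c = 1 := by
        rw [PySem.List.count_eq, hrow, List.count_append, List.count_cons_self,
          List.count_eq_zero.mpr hnpre, List.count_eq_zero.mpr hnsuf]
      omega
  rw [← key]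
  have hAlen : suf'.reverse.length = suf'.length := List.length_reverse
  constructor
  · intro h1 h2
    exact h1 (by omega)
  · intro h1 h2
    exact h1 (by omega)

-- the left scan over indices j-1 … 0 is a membership test in the first j cells
theorem inRowLeft_iff (row : List String) (cell : String) (jn : Nat) (hle : jn ≤ row.length) :
    inRowLeft row cell ((jn : Int) - 1) jn = true ↔ cell ∈ row.take jn := by
  induction jn with
  | zero => simp [inRowLeft]
  | succ n ih =>
    have hn : n < row.length := by omega
    have hstep : ((n : Int) + 1 - 1) = (n : Int) := by ring
    simp only [inRowLeft, Nat.cast_add, Nat.cast_one, hstep]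
    rw [if_pos (by omega)]
    rw [PySem.List.pyGetD_eq_getElem _ _ (by omega) (by exact_mod_cast hn)]
    simp only [Int.toNat_natCast]
    have htake : row.take (n + 1) = row.take n ++ [row[n]] := by
      rw [← List.take_concat_get hn, List.concat_eq_append]
    by_cases h : row[n] == cell
    · simp [htake, beq_iff_eq.mp h]
    · have hne : cell ≠ row[n] := fun e => h (by simp [e])
      simp only [h, Bool.false_eq_true, if_false]
      rw [ih (by omega)]
      constructor
      · intro hm; rw [htake]; exact List.mem_append_left _ hm
      · intro hm; rw [htake] at hm
        rcases List.mem_append.mp hm with hm | hm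
        · exact hm
        · exact absurd (List.mem_singleton.mp hm) hne

-- the right scan over indices k … 8 of a (≥ 9)-cell row is a membership test in cells k … 8
theorem inRowRight_iff (row : List String) (cell : String) (hlen : 9 ≤ row.length) :
    ∀ (fuel k : Nat), 9 ≤ k + fuel →
      (inRowRight row cell (k : Int) fuel = true ↔ cell ∈ (row.take 9).drop k) := by
  intro fuel
  induction fuel with
  | zero =>
    intro k hk
    rw [List.drop_eq_nil_of_le (le_trans (List.length_take_le 9 row) (by omega))]
    simp [inRowRight]
  | succ n ih =>
    intro k hk
    by_cases hk9 : 9 ≤ k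
    · simp only [inRowRight]
      rw [if_neg (by exact_mod_cast (show ¬ (k ≤ 8) by omega))]
      rw [List.drop_eq_nil_of_le (le_trans (List.length_take_le 9 row) (by omega))]
      simp
    · have hkl : k < row.length := by omega
      have hkt : k < (row.take 9).length := by rw [List.length_take]; omega
      simp only [inRowRight]
      rw [if_pos (by exact_mod_cast (show k ≤ 8 by omega))]
      rw [PySem.List.pyGetD_eq_getElem _ _ (by omega) (by exact_mod_cast hkl)]
      simp only [Int.toNat_natCast]
      have hdrop : (row.take 9).drop k = row[k] :: (row.take 9).drop (k + 1) := by
        rw [List.drop_eq_getElem_cons hkt]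
        congr 1
        exact List.getElem_take
      by_cases h : row[k] == cell
      · simp [hdrop, beq_iff_eq.mp h]
      · have hne : cell ≠ row[k] := fun e => h (by simp [e])
        simp only [h, Bool.false_eq_true, if_false]
        have hcast : ((k : Int) + 1) = ((k + 1 : Nat) : Int) := by push_cast; ring
        rw [hcast, ih (k + 1) (by omega)]
        constructor
        · intro hm; rw [hdrop]; exact List.mem_cons_of_mem _ hm
        · intro hm; rw [hdrop] at hm
          rcases List.mem_cons.mp hm with he | hm2
          · exact absurd he hne
          · exact hm2

-- a right scan that meets a duplicate before running off a short (≤ 9) row returns True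
theorem inRowRight_of_mem (row : List String) (cell : String) (hle9 : row.length ≤ 9) :
    ∀ (fuel k : Nat), row.length ≤ k + fuel → cell ∈ row.drop k →
      inRowRight row cell (k : Int) fuel = true := by
  intro fuel
  induction fuel with
  | zero =>
    intro k hk hm
    rw [List.drop_eq_nil_of_le (by omega)] at hm
    simp at hm
  | succ n ih =>
    intro k hk hm
    have hkl : k < row.length := by
      by_contra h
      rw [List.drop_eq_nil_of_le (by omega)] at hm
      simp at hm
    simp only [inRowRight]
    rw [if_pos (by exact_mod_cast (show k ≤ 8 by omega))]
    rw [PySem.List.pyGetD_eq_getElem _ _ (by omega) (by exact_mod_cast hkl)]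
    simp only [Int.toNat_natCast]
    by_cases h : row[k] == cell
    · simp [h]
    · have hne : cell ≠ row[k] := fun e => h (by simp [e])
      simp only [h, Bool.false_eq_true, if_false]
      have hcast : ((k : Int) + 1) = ((k + 1 : Nat) : Int) := by push_cast; ring
      rw [hcast]
      apply ih (k + 1) (by omega)
      rw [List.drop_eq_getElem_cons hkl] at hm
      rcases List.mem_cons.mp hm with he | hm2
      · exact absurd he hne
      · exact hm2

-- a right scan that starts at or left of a matching reference ≤ 8 returns True
theorem inRowRight_hits (row : List String) (cell : String) :
    ∀ (fuel : Nat) (r0 rs : Int), r0 ≤ rs → rs ≤ 8 → (9 - r0).toNat ≤ fuel →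
      PySem.List.pyGetD row rs "" = cell → inRowRight row cell r0 fuel = true := by
  intro fuel
  induction fuel with
  | zero => intro r0 rs h1 h2 h3 _; omega
  | succ n ih =>
    intro r0 rs h1 h2 h3 h4
    simp only [inRowRight]
    rw [if_pos (by omega : r0 ≤ 8)]
    by_cases h : PySem.List.pyGetD row r0 "" == cell
    · simp [h]
    · have hne : r0 ≠ rs := fun e => h (by rw [e, h4]; simp)
      simp only [h, Bool.false_eq_true, if_false]
      exact ih (r0 + 1) rs (by omega) h2 (by omega) h4

-- counting the cell across the whole row exceeds 1 iff it also occurs outside position j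
theorem count_gt_one_iff (row : List String) (jn : Nat) (hj : jn < row.length)
    (c : String) (hc : row[jn] = c) :
    (1 < PySem.List.count row c) ↔ (c ∈ row.take jn ∨ c ∈ row.drop (jn + 1)) := by
  rw [PySem.List.count_eq]
  conv_lhs => rw [show row = row.take jn ++ row.drop jn from (List.take_append_drop jn row).symm]
  rw [List.drop_eq_getElem_cons hj, hc]
  rw [List.count_append, List.count_cons]
  simp only [beq_self_eq_true, if_pos]
  have h1 : c ∈ row.take jn ↔ 0 < (row.take jn).count c := List.count_pos_iff.symm
  have h2 : c ∈ row.drop (jn + 1) ↔ 0 < (row.drop (jn + 1)).count c := List.count_pos_iff.symm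
  rw [h1, h2]
  omega

-- ===== VERDICT (by name: the statement is the Claim_ definition above) =====
theorem inRow_spec : Claim_unchanged_inRow := by
  unfold Claim_unchanged_inRow Spec_inRow
  intro i j board _ hpre hnD
  obtain ⟨hineg, hib, hjlow, hjr, hbranch⟩ := hpre
  rw [D_inRow_iff] at hnD
  simp only [inRow, inRow_alt]
  generalize hrow : PySem.List.pyGetD board i [] = row
  rw [hrow] at hjlow hjr hbranch hnD
  rcases hbranch with ⟨hj0, hdisj⟩ | ⟨hjneg, hle9⟩
  · -- j ≥ 0: A and B agree outright
    obtain ⟨jn, rfl⟩ : ∃ n : Nat, j = (n : Int) := ⟨j.toNat, (Int.toNat_of_nonneg hj0).symm⟩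
    have hjl : jn < row.length := by exact_mod_cast hjr
    have hcell : PySem.List.pyGetD row (jn : Int) "" = row[jn] := by
      rw [PySem.List.pyGetD_eq_getElem _ _ (by omega) (by exact_mod_cast hjl)]
      simp
    rw [hcell] at hdisj ⊢
    simp only [Int.toNat_natCast] at hdisj
    by_cases hd : (row[jn] == ".") = true
    · rw [if_pos hd, if_pos hd]
    · have hdot : ¬ row[jn] = "." := by simpa using hd
      rw [if_neg hd, if_neg hd]
      rw [firstLast_ne_iff row row[jn] (List.getElem_mem hjl)]
      have hC := count_gt_one_iff row jn hjl row[jn] rfl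
      have hL := inRowLeft_iff row row[jn] jn (le_of_lt hjl)
      have hfuel : ((jn : Int)).toNat = jn := Int.toNat_natCast jn
      have hcast : ((jn : Int) + 1) = ((jn + 1 : Nat) : Int) := by push_cast; ring
      rcases hdisj with hdd | ⟨hle9, hm⟩ | ⟨hlen9, hj9, hm⟩ | ⟨hjge9, hm⟩
      · exact absurd hdd hdot
      · -- (b) a short row with a duplicate: A finds it in one of the two scans, B compares positions
        have hjn : jn < 9 := by omega
        have hfuel2 : ((9 : Int) - (jn : Int)).toNat = 9 - jn := by omega
        rw [hfuel, hfuel2]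
        by_cases hl : inRowLeft row row[jn] ((jn : Int) - 1) jn = true
        · have hgt := hC.mpr (Or.inl (hL.mp hl))
          rw [if_pos hl, decide_eq_true hgt]
        · rw [if_neg hl]
          have hnl : row[jn] ∉ row.take jn := fun h => hl (hL.mpr h)
          have hm2 : row[jn] ∈ row.drop (jn + 1) := by tauto
          rw [hcast]
          rw [inRowRight_of_mem row row[jn] hle9 (9 - jn) (jn + 1) (by omega) hm2]
          exact (decide_eq_true (hC.mpr (Or.inr hm2))).symm
      · -- (c) a long row, j < 9: A scans cells 0 … 8; any duplicate is visible there or absent beyond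
        have hjn : jn < 9 := by exact_mod_cast hj9
        have hfuel2 : ((9 : Int) - (jn : Int)).toNat = 9 - jn := by omega
        rw [hfuel, hfuel2]
        have hR := inRowRight_iff row row[jn] hlen9 (9 - jn) (jn + 1) (by omega)
        have hdecomp : row.drop (jn + 1) = (row.take 9).drop (jn + 1) ++ row.drop 9 := by
          conv_lhs => rw [← List.take_append_drop 9 row]
          rw [List.drop_append_of_le_length (by rw [List.length_take]; omega)]
        by_cases hl : inRowLeft row row[jn] ((jn : Int) - 1) jn = true
        · have hgt := hC.mpr (Or.inl (hL.mp hl))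
          rw [if_pos hl, decide_eq_true hgt]
        · rw [if_neg hl]
          have hnl : row[jn] ∉ row.take jn := fun h => hl (hL.mpr h)
          rw [hcast, Bool.eq_iff_iff, hR, decide_eq_true_iff, hC]
          constructor
          · intro h9
            exact Or.inr (hdecomp ▸ List.mem_append_left _ h9)
          · rintro (h | h)
            · exact absurd h hnl
            · rw [hdecomp] at h
              rcases List.mem_append.mp h with h | h
              · exact h
              · rcases hm with h' | h' | h'
                · exact absurd h' hnl
                · exact h'
                · exact absurd h h'
      · -- (d) j ≥ 9: A's right scan never runs; any duplicate lies left of j or is absent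
        have hjge : 9 ≤ jn := by exact_mod_cast hjge9
        have hfuel2 : ((9 : Int) - (jn : Int)).toNat = 0 := by omega
        rw [hfuel, hfuel2]
        by_cases hl : inRowLeft row row[jn] ((jn : Int) - 1) jn = true
        · have hgt := hC.mpr (Or.inl (hL.mp hl))
          rw [if_pos hl, decide_eq_true hgt]
        · rw [if_neg hl]
          have hnl : row[jn] ∉ row.take jn := fun h => hl (hL.mpr h)
          rcases hm with hmt | hnd
          · exact absurd (hL.mpr hmt) hl
          · rw [show inRowRight row row[jn] ((jn : Int) + 1) 0 = false from rfl]
            rw [Bool.eq_iff_iff, decide_eq_true_iff, hC]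
            simp only [Bool.false_eq_true, false_iff]
            rintro (h | h)
            · exact hnl h
            · exact hnd h
  · -- j < 0 on a short row: outside D_ the cell is '.' or duplicated, and both sides agree
    have hk1 : 0 < (-j).toNat := by omega
    have hk2 : (-j).toNat ≤ row.length := by omega
    have hidx : row.length - (-j).toNat < row.length := by omega
    have hjk : j = -(((-j).toNat : Nat) : Int) := by omega
    rw [hjk] at hnD ⊢
    rw [PySem.List.pyGetD_neg_natCast row ((-j).toNat) "" hk1 hk2] at hnD ⊢
    by_cases hd : (row[row.length - (-j).toNat] == ".") = true
    · rw [if_pos hd, if_pos hd]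
    · rw [if_neg hd, if_neg hd]
      have hzero : ((-(((-j).toNat : Nat) : Int))).toNat = 0 := by omega
      rw [hzero]
      rw [show inRowLeft row (row[row.length - (-j).toNat]) (-(((-j).toNat : Nat) : Int) - 1) 0 = false from rfl]
      simp only [Bool.false_eq_true, if_false]
      have hA : inRowRight row (row[row.length - (-j).toNat])
          (-(((-j).toNat : Nat) : Int) + 1) ((9 - -(((-j).toNat : Nat) : Int)).toNat) = true := by
        apply inRowRight_hits row _ _ _ ((row.length - (-j).toNat : Nat) : Int) (by omega) (by omega) (by omega)
        rw [PySem.List.pyGetD_eq_getElem _ _ (by omega) (by exact_mod_cast hidx)]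
        simp
      rw [hA]
      rw [firstLast_ne_iff row _ (List.getElem_mem hidx)]
      have hmem : row[row.length - (-j).toNat] ∈ row := List.getElem_mem _
      have hcnt : 0 < List.count (row[row.length - (-j).toNat]) row := List.count_pos_iff.mpr hmem
      have hne1 : List.count (row[row.length - (-j).toNat]) row ≠ 1 := fun h1 =>
        hnD ⟨by omega, by omega, by simpa using hd, h1⟩
      have hgt : 1 < PySem.List.count row (row[row.length - (-j).toNat]) := by
        rw [PySem.List.count_eq]; omega
      rw [decide_eq_true hgt]

theorem inRow_changed : Claim_changed_inRow := by unfold Claim_changed_inRow; decide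

theorem inRow_tight : Claim_exact_inRow := by
  unfold Claim_exact_inRow
  intro i j board _ hpre hD
  obtain ⟨hineg, hib, hjlow, hjr, hbranch⟩ := hpre
  rw [D_inRow_iff] at hD
  simp only [inRow, inRow_alt]
  generalize hrow : PySem.List.pyGetD board i [] = row
  rw [hrow] at hjlow hjr hbranch hD
  obtain ⟨hjl2, hjneg, hdot, hcnt1⟩ := hD
  rcases hbranch with ⟨hj0, _⟩ | ⟨_, hle9⟩
  · omega
  · have hk1 : 0 < (-j).toNat := by omega
    have hk2 : (-j).toNat ≤ row.length := by omega
    have hidx : row.length - (-j).toNat < row.length := by omega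
    have hjk : j = -(((-j).toNat : Nat) : Int) := by omega
    rw [hjk] at hdot hcnt1 ⊢
    rw [PySem.List.pyGetD_neg_natCast row ((-j).toNat) "" hk1 hk2] at hdot hcnt1 ⊢
    have hd : ¬ (row[row.length - (-j).toNat] == ".") = true := by simpa using hdot
    rw [if_neg hd, if_neg hd]
    have hzero : ((-(((-j).toNat : Nat) : Int))).toNat = 0 := by omega
    rw [hzero]
    rw [show inRowLeft row (row[row.length - (-j).toNat]) (-(((-j).toNat : Nat) : Int) - 1) 0 = false from rfl]
    simp only [Bool.false_eq_true, if_false]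
    have hA : inRowRight row (row[row.length - (-j).toNat])
        (-(((-j).toNat : Nat) : Int) + 1) ((9 - -(((-j).toNat : Nat) : Int)).toNat) = true := by
      apply inRowRight_hits row _ _ _ ((row.length - (-j).toNat : Nat) : Int) (by omega) (by omega) (by omega)
      rw [PySem.List.pyGetD_eq_getElem _ _ (by omega) (by exact_mod_cast hidx)]
      simp
    rw [hA]
    rw [firstLast_ne_iff row _ (List.getElem_mem hidx)]
    have hB : decide (1 < PySem.List.count row (row[row.length - (-j).toNat])) = false := by
      rw [PySem.List.count_eq, hcnt1]
      simp
    rw [hB]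
    simp
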